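-- pv_equiv track=rewrite | github.com/dgrinvests-dotcom/DGR-AGENT | src/agents/property_specialists/fix_flip_agent.py | _extract_qualification_info
-- ===== SOURCE A (Python) =====
-- from typing import Dict, Any, Optional, List
--
-- def _extract_qualification_info(user_message: str, analysis: Dict[str, Any]) -> Dict[str, Any]:
--     """
--     Extract qualification information from user message
--     """
--     message_lower = user_message.lower()
--     extracted = {}
--
--     # Occupancy status
--     if any(word in message_lower for word in ["vacant", "empty", "nobody living"]):
--         extracted["occupancy_status"] = "vacant"
--     elif any(word in message_lower for word in ["rented", "tenant", "occupied by tenant"]):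
--         extracted["occupancy_status"] = "rented"
--     elif any(word in message_lower for word in ["live there", "i live", "owner occupied"]):
--         extracted["occupancy_status"] = "owner_occupied"
--
--     # Condition assessment
--     if any(word in message_lower for word in ["good condition", "great shape", "well maintained"]):
--         extracted["condition"] = "good"
--     elif any(word in message_lower for word in ["needs work", "fixer upper", "rough shape"]):
--         extracted["condition"] = "needs_work"
--     elif any(word in message_lower for word in ["bad condition", "terrible", "falling apart"]):
--         extracted["condition"] = "poor"
--
--     # Repairs needed
--     if any(word in message_lower for word in ["roof", "roofing", "leak"]):
--         extracted["repairs_needed"] = "roof_issues"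
--     elif any(word in message_lower for word in ["plumbing", "pipes", "water"]):
--         extracted["repairs_needed"] = "plumbing_issues"
--     elif any(word in message_lower for word in ["electrical", "wiring", "electric"]):
--         extracted["repairs_needed"] = "electrical_issues"
--     elif any(word in message_lower for word in ["foundation", "structural", "sinking"]):
--         extracted["repairs_needed"] = "structural_issues"
--
--     # Timeline
--     if any(word in message_lower for word in ["asap", "immediately", "right away", "urgent"]):
--         extracted["timeline"] = "immediate"
--     elif any(word in message_lower for word in ["few weeks", "month", "soon"]):
--         extracted["timeline"] = "1-3_months"
--     elif any(word in message_lower for word in ["few months", "later this year"]):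
--         extracted["timeline"] = "3-6_months"
--     elif any(word in message_lower for word in ["no rush", "flexible", "whenever"]):
--         extracted["timeline"] = "flexible"
--
--     # Motivation
--     if any(word in message_lower for word in ["divorce", "separated"]):
--         extracted["motivation"] = "divorce"
--     elif any(word in message_lower for word in ["inherited", "estate", "passed away"]):
--         extracted["motivation"] = "inherited"
--     elif any(word in message_lower for word in ["relocating", "moving", "job transfer"]):
--         extracted["motivation"] = "relocation"
--     elif any(word in message_lower for word in ["financial", "behind on payments", "foreclosure"]):
--         extracted["motivation"] = "financial_distress"
--
--     return extracted
-- ===== SOURCE B (Python) =====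
-- _FIELDS = ["occupancy_status", "condition", "repairs_needed", "timeline", "motivation"]
--
-- # Flat keyword table: (keyword, field, rank, value). rank is the position of the
-- # rule within its field; lower rank wins.
-- _KEYWORD_TABLE = [
--     ("vacant", "occupancy_status", 0, "vacant"),
--     ("empty", "occupancy_status", 0, "vacant"),
--     ("nobody living", "occupancy_status", 0, "vacant"),
--     ("rented", "occupancy_status", 1, "rented"),
--     ("tenant", "occupancy_status", 1, "rented"),
--     ("occupied by tenant", "occupancy_status", 1, "rented"),
--     ("live there", "occupancy_status", 2, "owner_occupied"),
--     ("i live", "occupancy_status", 2, "owner_occupied"),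
--     ("owner occupied", "occupancy_status", 2, "owner_occupied"),
--     ("good condition", "condition", 0, "good"),
--     ("great shape", "condition", 0, "good"),
--     ("well maintained", "condition", 0, "good"),
--     ("needs work", "condition", 1, "needs_work"),
--     ("fixer upper", "condition", 1, "needs_work"),
--     ("rough shape", "condition", 1, "needs_work"),
--     ("bad condition", "condition", 2, "poor"),
--     ("terrible", "condition", 2, "poor"),
--     ("falling apart", "condition", 2, "poor"),
--     ("roof", "repairs_needed", 0, "roof_issues"),
--     ("roofing", "repairs_needed", 0, "roof_issues"),
--     ("leak", "repairs_needed", 0, "roof_issues"),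
--     ("plumbing", "repairs_needed", 1, "plumbing_issues"),
--     ("pipes", "repairs_needed", 1, "plumbing_issues"),
--     ("water", "repairs_needed", 1, "plumbing_issues"),
--     ("electrical", "repairs_needed", 2, "electrical_issues"),
--     ("wiring", "repairs_needed", 2, "electrical_issues"),
--     ("electric", "repairs_needed", 2, "electrical_issues"),
--     ("foundation", "repairs_needed", 3, "structural_issues"),
--     ("structural", "repairs_needed", 3, "structural_issues"),
--     ("sinking", "repairs_needed", 3, "structural_issues"),
--     ("asap", "timeline", 0, "immediate"),
--     ("immediately", "timeline", 0, "immediate"),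
--     ("right away", "timeline", 0, "immediate"),
--     ("urgent", "timeline", 0, "immediate"),
--     ("few weeks", "timeline", 1, "1-3_months"),
--     ("month", "timeline", 1, "1-3_months"),
--     ("soon", "timeline", 1, "1-3_months"),
--     ("few months", "timeline", 2, "3-6_months"),
--     ("later this year", "timeline", 2, "3-6_months"),
--     ("no rush", "timeline", 3, "flexible"),
--     ("flexible", "timeline", 3, "flexible"),
--     ("whenever", "timeline", 3, "flexible"),
--     ("divorce", "motivation", 0, "divorce"),
--     ("separated", "motivation", 0, "divorce"),
--     ("inherited", "motivation", 1, "inherited"),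
--     ("estate", "motivation", 1, "inherited"),
--     ("passed away", "motivation", 1, "inherited"),
--     ("relocating", "motivation", 2, "relocation"),
--     ("moving", "motivation", 2, "relocation"),
--     ("job transfer", "motivation", 2, "relocation"),
--     ("financial", "motivation", 3, "financial_distress"),
--     ("behind on payments", "motivation", 3, "financial_distress"),
--     ("foreclosure", "motivation", 3, "financial_distress"),
-- ]
--
--
-- def _extract_qualification_info(user_message, analysis):
--     message_lower = user_message.lower()
--     # One pass over every keyword: collect, per field, the best (lowest-rank)
--     # matching rule instead of breaking at the first match.
--     best = {}
--     for keyword, field, rank, value in _KEYWORD_TABLE: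
--         if keyword in message_lower:
--             cur = best.get(field)
--             if cur is None or rank < cur[0]:
--                 best[field] = (rank, value)
--     # Projection pass: emit the fields in their canonical order.
--     extracted = {}
--     for field in _FIELDS:
--         if field in best:
--             extracted[field] = best[field][1]
--     return extracted
-- ===== Notes on version B (the rewrite author's own statement) =====
-- stated objective: alternative
-- what changed: Instead of five if/elif chains that stop at the first matching rule, B makes one pass over a flat (keyword, field, rank, value) table collecting for every field the lowest-rank matching rule (argmin, no early break), then a projection pass emits the fields in canonical order.
import Mathlib
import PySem

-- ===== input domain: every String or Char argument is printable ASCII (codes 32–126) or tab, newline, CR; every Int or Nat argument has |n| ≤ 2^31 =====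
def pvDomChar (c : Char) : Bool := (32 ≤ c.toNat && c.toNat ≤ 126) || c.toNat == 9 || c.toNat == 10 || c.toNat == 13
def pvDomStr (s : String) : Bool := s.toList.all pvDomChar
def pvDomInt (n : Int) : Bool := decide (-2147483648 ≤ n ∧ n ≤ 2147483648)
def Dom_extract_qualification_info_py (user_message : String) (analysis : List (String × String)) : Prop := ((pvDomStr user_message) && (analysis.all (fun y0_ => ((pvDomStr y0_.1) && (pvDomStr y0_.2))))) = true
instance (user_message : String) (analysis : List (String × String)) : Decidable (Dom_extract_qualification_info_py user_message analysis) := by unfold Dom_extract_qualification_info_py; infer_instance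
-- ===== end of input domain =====

-- B replaces A's five first-match if/elif chains by one exhaustive pass over a flat
-- keyword table keeping the lowest-rank match per field, plus a projection pass
-- (objective: alternative algorithm, same cost).

-- ===== PORT A =====
-- 'any(word in message_lower for word in ws)' of A
def pvAnyIn (m : String) (ws : List String) : Bool :=
  ws.any (fun w => PySem.Str.isIn w m)

-- the dict 'extracted' only ever receives fresh keys, so each assignment is an append
def extract_qualification_info_py (user_message : String) (analysis : List (String × String)) : List (String × String) :=
  let message_lower := PySem.Str.lower user_message
  let extracted : List (String × String) := []
  -- Occupancy status
  let extracted :=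
    if pvAnyIn message_lower ["vacant", "empty", "nobody living"] then extracted ++ [("occupancy_status", "vacant")]
    else if pvAnyIn message_lower ["rented", "tenant", "occupied by tenant"] then extracted ++ [("occupancy_status", "rented")]
    else if pvAnyIn message_lower ["live there", "i live", "owner occupied"] then extracted ++ [("occupancy_status", "owner_occupied")]
    else extracted
  -- Condition assessment
  let extracted :=
    if pvAnyIn message_lower ["good condition", "great shape", "well maintained"] then extracted ++ [("condition", "good")]
    else if pvAnyIn message_lower ["needs work", "fixer upper", "rough shape"] then extracted ++ [("condition", "needs_work")]
    else if pvAnyIn message_lower ["bad condition", "terrible", "falling apart"] then extracted ++ [("condition", "poor")]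
    else extracted
  -- Repairs needed
  let extracted :=
    if pvAnyIn message_lower ["roof", "roofing", "leak"] then extracted ++ [("repairs_needed", "roof_issues")]
    else if pvAnyIn message_lower ["plumbing", "pipes", "water"] then extracted ++ [("repairs_needed", "plumbing_issues")]
    else if pvAnyIn message_lower ["electrical", "wiring", "electric"] then extracted ++ [("repairs_needed", "electrical_issues")]
    else if pvAnyIn message_lower ["foundation", "structural", "sinking"] then extracted ++ [("repairs_needed", "structural_issues")]
    else extracted
  -- Timeline
  let extracted :=
    if pvAnyIn message_lower ["asap", "immediately", "right away", "urgent"] then extracted ++ [("timeline", "immediate")]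
    else if pvAnyIn message_lower ["few weeks", "month", "soon"] then extracted ++ [("timeline", "1-3_months")]
    else if pvAnyIn message_lower ["few months", "later this year"] then extracted ++ [("timeline", "3-6_months")]
    else if pvAnyIn message_lower ["no rush", "flexible", "whenever"] then extracted ++ [("timeline", "flexible")]
    else extracted
  -- Motivation
  let extracted :=
    if pvAnyIn message_lower ["divorce", "separated"] then extracted ++ [("motivation", "divorce")]
    else if pvAnyIn message_lower ["inherited", "estate", "passed away"] then extracted ++ [("motivation", "inherited")]
    else if pvAnyIn message_lower ["relocating", "moving", "job transfer"] then extracted ++ [("motivation", "relocation")]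
    else if pvAnyIn message_lower ["financial", "behind on payments", "foreclosure"] then extracted ++ [("motivation", "financial_distress")]
    else extracted
  extracted

-- ===== PORT B =====
-- Source B's _FIELDS
def pvFields : List String :=
  ["occupancy_status", "condition", "repairs_needed", "timeline", "motivation"]

-- Source B's _KEYWORD_TABLE: (keyword, field, rank, value)
def pvKeywordTable : List (String × String × Int × String) :=
  [ ("vacant", "occupancy_status", 0, "vacant"),
    ("empty", "occupancy_status", 0, "vacant"),
    ("nobody living", "occupancy_status", 0, "vacant"),
    ("rented", "occupancy_status", 1, "rented"),
    ("tenant", "occupancy_status", 1, "rented"),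
    ("occupied by tenant", "occupancy_status", 1, "rented"),
    ("live there", "occupancy_status", 2, "owner_occupied"),
    ("i live", "occupancy_status", 2, "owner_occupied"),
    ("owner occupied", "occupancy_status", 2, "owner_occupied"),
    ("good condition", "condition", 0, "good"),
    ("great shape", "condition", 0, "good"),
    ("well maintained", "condition", 0, "good"),
    ("needs work", "condition", 1, "needs_work"),
    ("fixer upper", "condition", 1, "needs_work"),
    ("rough shape", "condition", 1, "needs_work"),
    ("bad condition", "condition", 2, "poor"),
    ("terrible", "condition", 2, "poor"),
    ("falling apart", "condition", 2, "poor"),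
    ("roof", "repairs_needed", 0, "roof_issues"),
    ("roofing", "repairs_needed", 0, "roof_issues"),
    ("leak", "repairs_needed", 0, "roof_issues"),
    ("plumbing", "repairs_needed", 1, "plumbing_issues"),
    ("pipes", "repairs_needed", 1, "plumbing_issues"),
    ("water", "repairs_needed", 1, "plumbing_issues"),
    ("electrical", "repairs_needed", 2, "electrical_issues"),
    ("wiring", "repairs_needed", 2, "electrical_issues"),
    ("electric", "repairs_needed", 2, "electrical_issues"),
    ("foundation", "repairs_needed", 3, "structural_issues"),
    ("structural", "repairs_needed", 3, "structural_issues"),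
    ("sinking", "repairs_needed", 3, "structural_issues"),
    ("asap", "timeline", 0, "immediate"),
    ("immediately", "timeline", 0, "immediate"),
    ("right away", "timeline", 0, "immediate"),
    ("urgent", "timeline", 0, "immediate"),
    ("few weeks", "timeline", 1, "1-3_months"),
    ("month", "timeline", 1, "1-3_months"),
    ("soon", "timeline", 1, "1-3_months"),
    ("few months", "timeline", 2, "3-6_months"),
    ("later this year", "timeline", 2, "3-6_months"),
    ("no rush", "timeline", 3, "flexible"),
    ("flexible", "timeline", 3, "flexible"),
    ("whenever", "timeline", 3, "flexible"),
    ("divorce", "motivation", 0, "divorce"),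
    ("separated", "motivation", 0, "divorce"),
    ("inherited", "motivation", 1, "inherited"),
    ("estate", "motivation", 1, "inherited"),
    ("passed away", "motivation", 1, "inherited"),
    ("relocating", "motivation", 2, "relocation"),
    ("moving", "motivation", 2, "relocation"),
    ("job transfer", "motivation", 2, "relocation"),
    ("financial", "motivation", 3, "financial_distress"),
    ("behind on payments", "motivation", 3, "financial_distress"),
    ("foreclosure", "motivation", 3, "financial_distress") ]

-- one step of Source B's collecting loop: keep the lowest-rank matching rule per field
def pvStepB (m : String) (best : PySem.Dict String (Int × String))
    (e : String × String × Int × String) : PySem.Dict String (Int × String) :=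
  if PySem.Str.isIn e.1 m then
    match best.get? e.2.1 with
    | none => best.insert e.2.1 (e.2.2.1, e.2.2.2)
    | some cur => if e.2.2.1 < cur.1 then best.insert e.2.1 (e.2.2.1, e.2.2.2) else best
  else best

def extract_qualification_info_py_alt (user_message : String) (analysis : List (String × String)) : List (String × String) :=
  let message_lower := PySem.Str.lower user_message
  let best := pvKeywordTable.foldl (pvStepB message_lower) PySem.Dict.empty
  pvFields.foldl
    (fun extracted f =>
      match best.get? f with
      | some rv => extracted ++ [(f, rv.2)]
      | none => extracted)
    []

-- ===== PRECONDITION & SPEC =====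
def Spec_extract_qualification_info_py (user_message : String) (analysis : List (String × String)) (out : List (String × String)) : Prop := out = extract_qualification_info_py_alt user_message analysis
instance (user_message : String) (analysis : List (String × String)) (out : List (String × String)) : Decidable (Spec_extract_qualification_info_py user_message analysis out) := by unfold Spec_extract_qualification_info_py; infer_instance

-- ===== CLAIM (what is proved, stated in full; the proofs are below) =====
def Claim_equal_extract_qualification_info_py : Prop := ∀ (user_message : String) (analysis : List (String × String)), Dom_extract_qualification_info_py user_message analysis → Spec_extract_qualification_info_py user_message analysis (extract_qualification_info_py user_message analysis)

-- ===== LEMMAS AND PROOFS =====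

-- the per-field shadow of pvStepB on a single Option cell
def pvStepO (m : String) (o : Option (Int × String))
    (e : String × String × Int × String) : Option (Int × String) :=
  if PySem.Str.isIn e.1 m then
    match o with
    | none => some (e.2.2.1, e.2.2.2)
    | some cur => if e.2.2.1 < cur.1 then some (e.2.2.1, e.2.2.2) else o
  else o

-- the dict fold, observed at one key, is the option fold over that key's entries
theorem pvSplit (m : String) (f : String) :
    ∀ (E : List (String × String × Int × String)) (d : PySem.Dict String (Int × String)),
    (E.foldl (pvStepB m) d).get? f
      = (E.filter (fun e => e.2.1 == f)).foldl (pvStepO m) (d.get? f) := by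
  intro E
  induction E with
  | nil => intro d; rfl
  | cons e E ih =>
    intro d
    rw [List.foldl_cons, ih, List.filter_cons]
    by_cases hf : e.2.1 = f
    · simp only [hf, BEq.rfl, if_pos, List.foldl_cons]
      congr 1
      unfold pvStepB pvStepO
      rw [hf]
      by_cases hin : PySem.Str.isIn e.1 m = true
      · rw [if_pos hin, if_pos hin]
        cases hg : d.get? f with
        | none => simp [PySem.Dict.get?_insert_self]
        | some cur =>
          by_cases hlt : e.2.2.1 < cur.1
          · simp [hlt, PySem.Dict.get?_insert_self]
          · simp [hlt, hg]
      · rw [if_neg hin, if_neg hin]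
    · have hb : (e.2.1 == f) = false := by simp [hf]
      rw [hb]
      simp only [Bool.false_eq_true, if_false]
      congr 1
      unfold pvStepB
      by_cases hin : PySem.Str.isIn e.1 m = true
      · rw [if_pos hin]
        cases hg : d.get? e.2.1 with
        | none => exact PySem.Dict.get?_insert_of_ne _ _ (Ne.symm hf)
        | some cur =>
          by_cases hlt : e.2.2.1 < cur.1
          · simp only [hlt, if_pos]
            exact PySem.Dict.get?_insert_of_ne _ _ (Ne.symm hf)
          · simp [hlt]
      · rw [if_neg hin]

-- once a rank at most every remaining rank is held, the option fold is constant
theorem pvMono (m : String) :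
    ∀ (E : List (String × String × Int × String)) (r : Int) (v : String),
    (∀ e ∈ E, r ≤ e.2.2.1) → E.foldl (pvStepO m) (some (r, v)) = some (r, v) := by
  intro E
  induction E with
  | nil => intro r v _; rfl
  | cons e E ih =>
    intro r v h
    rw [List.foldl_cons]
    have hstep : pvStepO m (some (r, v)) e = some (r, v) := by
      unfold pvStepO
      have : ¬ e.2.2.1 < r := not_lt.mpr (h e (List.mem_cons_self ..))
      by_cases hin : PySem.Str.isIn e.1 m = true <;> simp [this]
    rw [hstep]
    exact ih r v (fun x hx => h x (List.mem_cons_of_mem _ hx))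

-- with nondecreasing ranks, the argmin fold is the first match
theorem pvFirst (m : String) :
    ∀ (E : List (String × String × Int × String)),
    E.Pairwise (fun a b => a.2.2.1 ≤ b.2.2.1) →
    E.foldl (pvStepO m) none
      = (E.find? (fun e => PySem.Str.isIn e.1 m)).map (fun e => (e.2.2.1, e.2.2.2)) := by
  intro E
  induction E with
  | nil => intro _; rfl
  | cons e E ih =>
    intro hp
    rw [List.foldl_cons, List.find?_cons]
    cases hin : PySem.Str.isIn e.1 m with
    | true =>
      have h1 : pvStepO m none e = some (e.2.2.1, e.2.2.2) := by
        unfold pvStepO; rw [hin]; simp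
      rw [h1, pvMono m E _ _ (fun x hx => (List.pairwise_cons.mp hp).1 x hx)]
      rfl
    | false =>
      have h1 : pvStepO m none e = none := by
        unfold pvStepO; rw [hin]; simp
      rw [h1]
      exact ih (List.pairwise_cons.mp hp).2

-- a group of entries sharing one (rank, value): find? is 'any'
theorem pvGroup (m : String) (r : Int) (v : String) :
    ∀ (E : List (String × String × Int × String)),
    (∀ e ∈ E, e.2.2 = (r, v)) →
    (E.find? (fun e => PySem.Str.isIn e.1 m)).map (fun e => (e.2.2.1, e.2.2.2))
      = if pvAnyIn m (E.map (·.1)) then some (r, v) else none := by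
  intro E
  induction E with
  | nil => intro _; rfl
  | cons e E ih =>
    intro h
    have he := h e (List.mem_cons_self ..)
    rw [List.find?_cons]
    cases hin : PySem.Str.isIn e.1 m with
    | true =>
      have hany : pvAnyIn m ((e :: E).map (·.1)) = true := by
        unfold pvAnyIn
        simp only [List.map_cons, List.any_cons, hin, Bool.true_or]
      rw [hany, if_pos rfl]
      simp [he]
    | false =>
      have hrec := ih (fun x hx => h x (List.mem_cons_of_mem _ hx))
      have hany : pvAnyIn m ((e :: E).map (·.1)) = pvAnyIn m (E.map (·.1)) := by
        unfold pvAnyIn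
        simp only [List.map_cons, List.any_cons, hin, Bool.false_or]
      rw [hany]
      exact hrec

-- find? distributes over ++ (first list wins)
theorem pvFindApp (m : String) (E1 E2 : List (String × String × Int × String)) :
    ((E1 ++ E2).find? (fun e => PySem.Str.isIn e.1 m)).map (fun e => (e.2.2.1, e.2.2.2))
      = match (E1.find? (fun e => PySem.Str.isIn e.1 m)) with
        | some e => some (e.2.2.1, e.2.2.2)
        | none => ((E2.find? (fun e => PySem.Str.isIn e.1 m)).map (fun e => (e.2.2.1, e.2.2.2))) := by
  rw [List.find?_append]
  cases E1.find? (fun e => PySem.Str.isIn e.1 m) <;> rfl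

-- the per-field value B computes, in A's if/elif form
def pvFieldOpt (m : String) (groups : List (List String × Int × String)) : Option (Int × String) :=
  groups.foldr
    (fun g rest => if pvAnyIn m g.1 then some (g.2.1, g.2.2) else rest) none

theorem pvLookup (m : String) (f : String) (groups : List (List String × Int × String))
    (hE : pvKeywordTable.filter (fun e => e.2.1 == f)
            = groups.flatMap (fun g => g.1.map (fun k => (k, f, g.2.1, g.2.2))))
    (hp : (pvKeywordTable.filter (fun e => e.2.1 == f)).Pairwise (fun a b => a.2.2.1 ≤ b.2.2.1)) :
    (pvKeywordTable.foldl (pvStepB m) PySem.Dict.empty).get? f = pvFieldOpt m groups := by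
  rw [pvSplit, PySem.Dict.get?_empty, pvFirst m _ hp, hE]
  clear hE hp
  induction groups with
  | nil => rfl
  | cons g gs ih =>
    rw [List.flatMap_cons, pvFindApp, pvFieldOpt, List.foldr_cons]
    have hmem : ∀ e ∈ g.1.map (fun k => (k, f, g.2.1, g.2.2)), e.2.2 = (g.2.1, g.2.2) := by
      intro e he; simp at he; obtain ⟨k, _, hk⟩ := he; simp [← hk]
    have hgrp := pvGroup m g.2.1 g.2.2 _ hmem
    have hmap : (g.1.map (fun k => (k, f, g.2.1, g.2.2))).map (·.1) = g.1 := by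
      simp [List.map_map, Function.comp_def]
    rw [hmap] at hgrp
    cases hfind : (g.1.map (fun k => (k, f, g.2.1, g.2.2))).find? (fun e => PySem.Str.isIn e.1 m) with
    | some e =>
      rw [hfind] at hgrp
      by_cases hany : pvAnyIn m g.1 = true
      · rw [if_pos hany] at hgrp
        rw [if_pos hany]
        simpa using hgrp
      · rw [if_neg hany] at hgrp
        simp at hgrp
    | none =>
      rw [hfind] at hgrp
      by_cases hany : pvAnyIn m g.1 = true
      · rw [if_pos hany] at hgrp
        simp at hgrp
      · rw [if_neg hany]
        simpa [pvFieldOpt] using ih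

-- A's per-field if/elif append block, as appending the option's contribution
def pvOptList (f : String) (o : Option (Int × String)) : List (String × String) :=
  match o with
  | some rv => [(f, rv.2)]
  | none => []

theorem pvAppIf3 (acc : List (String × String)) (f : String) (b1 b2 b3 : Bool)
    (r1 r2 r3 : Int) (v1 v2 v3 : String) :
    (if b1 then acc ++ [(f, v1)] else if b2 then acc ++ [(f, v2)]
      else if b3 then acc ++ [(f, v3)] else acc)
    = acc ++ pvOptList f (if b1 then some (r1, v1) else if b2 then some (r2, v2)
        else if b3 then some (r3, v3) else none) := by
  cases b1 <;> cases b2 <;> cases b3 <;> simp [pvOptList]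

theorem pvAppIf4 (acc : List (String × String)) (f : String) (b1 b2 b3 b4 : Bool)
    (r1 r2 r3 r4 : Int) (v1 v2 v3 v4 : String) :
    (if b1 then acc ++ [(f, v1)] else if b2 then acc ++ [(f, v2)]
      else if b3 then acc ++ [(f, v3)] else if b4 then acc ++ [(f, v4)] else acc)
    = acc ++ pvOptList f (if b1 then some (r1, v1) else if b2 then some (r2, v2)
        else if b3 then some (r3, v3) else if b4 then some (r4, v4) else none) := by
  cases b1 <;> cases b2 <;> cases b3 <;> cases b4 <;> simp [pvOptList]

-- B's projection step, as appending the option's contribution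
theorem pvStepEq (acc : List (String × String)) (f : String) (o : Option (Int × String)) :
    (match o with
      | some rv => acc ++ [(f, rv.2)]
      | none => acc) = acc ++ pvOptList f o := by
  cases o <;> simp [pvOptList]

set_option maxHeartbeats 2000000 in
theorem extract_eq (user_message : String) (analysis : List (String × String)) :
    extract_qualification_info_py user_message analysis
      = extract_qualification_info_py_alt user_message analysis := by
  unfold extract_qualification_info_py extract_qualification_info_py_alt
  set m := PySem.Str.lower user_message with hm
  have hocc : (pvKeywordTable.foldl (pvStepB m) PySem.Dict.empty).get? "occupancy_status"
      = pvFieldOpt m [(["vacant", "empty", "nobody living"], 0, "vacant"),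
                      (["rented", "tenant", "occupied by tenant"], 1, "rented"),
                      (["live there", "i live", "owner occupied"], 2, "owner_occupied")] :=
    pvLookup m _ _ (by decide) (by decide)
  have hcond : (pvKeywordTable.foldl (pvStepB m) PySem.Dict.empty).get? "condition"
      = pvFieldOpt m [(["good condition", "great shape", "well maintained"], 0, "good"),
                      (["needs work", "fixer upper", "rough shape"], 1, "needs_work"),
                      (["bad condition", "terrible", "falling apart"], 2, "poor")] :=
    pvLookup m _ _ (by decide) (by decide)
  have hrep : (pvKeywordTable.foldl (pvStepB m) PySem.Dict.empty).get? "repairs_needed"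
      = pvFieldOpt m [(["roof", "roofing", "leak"], 0, "roof_issues"),
                      (["plumbing", "pipes", "water"], 1, "plumbing_issues"),
                      (["electrical", "wiring", "electric"], 2, "electrical_issues"),
                      (["foundation", "structural", "sinking"], 3, "structural_issues")] :=
    pvLookup m _ _ (by decide) (by decide)
  have htim : (pvKeywordTable.foldl (pvStepB m) PySem.Dict.empty).get? "timeline"
      = pvFieldOpt m [(["asap", "immediately", "right away", "urgent"], 0, "immediate"),
                      (["few weeks", "month", "soon"], 1, "1-3_months"),
                      (["few months", "later this year"], 2, "3-6_months"),
                      (["no rush", "flexible", "whenever"], 3, "flexible")] :=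
    pvLookup m _ _ (by decide) (by decide)
  have hmot : (pvKeywordTable.foldl (pvStepB m) PySem.Dict.empty).get? "motivation"
      = pvFieldOpt m [(["divorce", "separated"], 0, "divorce"),
                      (["inherited", "estate", "passed away"], 1, "inherited"),
                      (["relocating", "moving", "job transfer"], 2, "relocation"),
                      (["financial", "behind on payments", "foreclosure"], 3, "financial_distress")] :=
    pvLookup m _ _ (by decide) (by decide)
  rw [show pvFields = ["occupancy_status", "condition", "repairs_needed", "timeline", "motivation"] from rfl]
  simp only [List.foldl_cons, List.foldl_nil]
  rw [hocc, hcond, hrep, htim, hmot]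
  simp only [pvStepEq]
  rw [pvAppIf4 (r1 := 0) (r2 := 1) (r3 := 2) (r4 := 3)]
  rw [pvAppIf4 (r1 := 0) (r2 := 1) (r3 := 2) (r4 := 3)]
  rw [pvAppIf4 (r1 := 0) (r2 := 1) (r3 := 2) (r4 := 3)]
  rw [pvAppIf3 (r1 := 0) (r2 := 1) (r3 := 2)]
  rw [pvAppIf3 (r1 := 0) (r2 := 1) (r3 := 2)]
  rfl

-- ===== VERDICT (by name: the statement is the Claim_ definition above) =====
theorem extract_qualification_info_py_spec : Claim_equal_extract_qualification_info_py := by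
  intro um an _
  exact extract_eq um an
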